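-- pv_equiv track=rewrite | github.com/TiagoJRAlmeida/UA-LECI | projetos/PECI/PECI-G2-main/PastasPessoais/TiagoAlmeida/RandomScripts/teste2.py | max_intersection
-- ===== SOURCE A (Python) =====
-- from itertools import combinations
--
-- def max_intersection(lists):
--     max_result = set()
--     best_sequence = []
--
--     # Gerar todas as combinações possíveis de interseção
--     for r in range(2, len(lists) + 1):
--         for combo in combinations(lists, r):
--             intersection_result = set(combo[0])
--             sequence = [combo[0]]
--
--             for lst in combo[1:]:
--                 intersection_result &= set(lst)
--                 sequence.append(lst)
--
--                 # Atualiza a melhor interseção encontrada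
--                 if len(intersection_result) > len(max_result):
--                     max_result = intersection_result
--                     best_sequence = sequence[:]
--
--     return best_sequence, max_result
-- ===== SOURCE B (Python) =====
-- def max_intersection(lists):
--     # Only pairs can achieve the maximum: intersecting more lists never grows
--     # the result, and a strict improvement is required, so scan pairs once.
--     best_seq, best_set = [], set()
--     rest = lists
--     while rest:
--         a, rest = rest[0], rest[1:]
--         sa = set(a)
--         for b in rest:
--             inter = sa & set(b)
--             if len(inter) > len(best_set):
--                 best_seq, best_set = [a, b], inter
--     return best_seq, best_set
-- ===== Notes on version B (the rewrite author's own statement) =====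
-- stated objective: faster
-- what changed: A enumerates every combination of r=2..n lists (and all their prefixes) exponentially; B scans only the ordered pairs once, since intersecting more lists never enlarges the result and A's strict-improvement rule means the optimum is always attained (first) at a pair.
import Mathlib
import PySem

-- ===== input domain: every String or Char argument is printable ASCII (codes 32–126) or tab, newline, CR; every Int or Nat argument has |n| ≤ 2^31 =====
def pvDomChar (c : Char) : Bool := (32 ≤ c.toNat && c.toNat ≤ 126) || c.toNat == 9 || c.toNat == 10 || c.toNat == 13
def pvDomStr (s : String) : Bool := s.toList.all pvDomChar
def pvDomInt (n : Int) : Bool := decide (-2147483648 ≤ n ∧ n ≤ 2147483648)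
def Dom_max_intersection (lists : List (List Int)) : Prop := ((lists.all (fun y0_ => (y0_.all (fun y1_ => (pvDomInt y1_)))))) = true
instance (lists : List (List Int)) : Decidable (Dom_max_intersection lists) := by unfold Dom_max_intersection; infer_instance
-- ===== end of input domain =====

-- B replaces A's exponential enumeration of all combinations by a single scan of
-- ordered pairs: intersecting further lists never enlarges the result and A updates
-- only on a strict improvement, so the optimum is always attained at a pair.

-- ===== PORT A =====
-- itertools.combinations(xs, k) in itertools' order
def pvCombos {α : Type} : Nat → List α → List (List α)
  | 0, _ => [[]]
  | _ + 1, [] => []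
  | k + 1, x :: xs => ((pvCombos k xs).map (fun c => x :: c)) ++ pvCombos (k + 1) xs

-- body of A's 'for combo in combinations(lists, r)' loop; combos here always have ≥ 2
-- elements, the [] branch is unreachable and makes the match total
def pvAInner (st : List (List Int) × List Int) (combo : List (List Int)) :
    List (List Int) × List Int :=
  match combo with
  | [] => st
  | c0 :: rest =>
    (rest.foldl
      (fun acc lst =>
        let inter := PySem.Set.inter acc.1 (PySem.Set.ofList lst)
        let seq := acc.2.1 ++ [lst]
        let best := if inter.length > acc.2.2.2.length then (seq, inter) else acc.2.2
        (inter, seq, best))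
      (PySem.Set.ofList c0, [c0], st)).2.2

def max_intersection (lists : List (List Int)) : List (List Int) × List Int :=
  (PySem.List.pyRange 2 ((lists.length : Int) + 1)).foldl
    (fun st r => (pvCombos r.toNat lists).foldl pvAInner st) ([], [])

-- ===== PORT B =====
-- Source B's 'while rest: a, rest = rest[0], rest[1:]; for b in rest: …'
def pvBGo : List (List Int) → List (List Int) × List Int → List (List Int) × List Int
  | [], st => st
  | a :: rest, st =>
    pvBGo rest
      (rest.foldl
        (fun st b =>
          let inter := PySem.Set.inter (PySem.Set.ofList a) (PySem.Set.ofList b)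
          if inter.length > st.2.length then ([a, b], inter) else st)
        st)

def max_intersection_alt (lists : List (List Int)) : List (List Int) × List Int :=
  pvBGo lists ([], [])

-- ===== PRECONDITION & SPEC =====
def Spec_max_intersection (lists : List (List Int)) (out : List (List Int) × List Int) : Prop := out = max_intersection_alt lists
instance (lists : List (List Int)) (out : List (List Int) × List Int) : Decidable (Spec_max_intersection lists out) := by unfold Spec_max_intersection; infer_instance

-- ===== CLAIM (what is proved, stated in full; the proofs are below) =====
def Claim_equal_max_intersection : Prop := ∀ (lists : List (List Int)), Dom_max_intersection lists → Spec_max_intersection lists (max_intersection lists)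

-- ===== LEMMAS AND PROOFS =====

def pvInter (a b : List Int) : List Int :=
  PySem.Set.inter (PySem.Set.ofList a) (PySem.Set.ofList b)

-- one candidate pair, A's/B's update rule
def pvStep (st : List (List Int) × List Int) (p : List Int × List Int) :
    List (List Int) × List Int :=
  if (pvInter p.1 p.2).length > st.2.length then ([p.1, p.2], pvInter p.1 p.2) else st

-- all ordered pairs (earlier, later), scan order of both programs
def pvPairs {α : Type} : List α → List (α × α)
  | [] => []
  | x :: xs => (xs.map (fun y => (x, y))) ++ pvPairs xs

theorem pvBGo_eq (l : List (List Int)) :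
    ∀ st, pvBGo l st = (pvPairs l).foldl pvStep st := by
  induction l with
  | nil => intro st; rfl
  | cons a rest ih =>
    intro st
    simp only [pvBGo, pvPairs, List.foldl_append, List.foldl_map, ih]
    rfl

theorem pvStep_init_le (st : List (List Int) × List Int) (p : List Int × List Int) :
    st.2.length ≤ (pvStep st p).2.length := by
  unfold pvStep; split_ifs with h
  · exact Nat.le_of_lt h
  · exact le_refl _

theorem pvFoldl_init_le (ps : List (List Int × List Int)) :
    ∀ st, st.2.length ≤ (ps.foldl pvStep st).2.length := by
  induction ps with
  | nil => intro st; exact le_refl _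
  | cons q ps ih =>
    intro st
    exact le_trans (pvStep_init_le st q) (ih (pvStep st q))

theorem pvFoldl_mem_le (ps : List (List Int × List Int)) :
    ∀ st p, p ∈ ps → (pvInter p.1 p.2).length ≤ (ps.foldl pvStep st).2.length := by
  induction ps with
  | nil => intro st p h; exact absurd h (List.not_mem_nil)
  | cons q ps ih =>
    intro st p hp
    rcases List.mem_cons.mp hp with h | h
    · subst h
      refine le_trans ?_ (pvFoldl_init_le ps (pvStep st p))
      unfold pvStep; split_ifs with h
      · exact le_refl _
      · exact Nat.le_of_not_lt h
    · exact ih (pvStep st q) p h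

theorem pvInter_len_le {s : List Int} (t : List Int) :
    (PySem.Set.inter s t).length ≤ s.length :=
  List.length_filter_le _ _

-- A's inner loop never updates once the running intersection is dominated
theorem pvInnerFold_const (rest : List (List Int)) :
    ∀ (inter : List Int) (seq : List (List Int)) (st : List (List Int) × List Int),
      inter.length ≤ st.2.length →
      ((rest.foldl
        (fun acc lst =>
          let inter := PySem.Set.inter acc.1 (PySem.Set.ofList lst)
          let seq := acc.2.1 ++ [lst]
          let best := if inter.length > acc.2.2.2.length then (seq, inter) else acc.2.2
          (inter, seq, best))
        (inter, seq, st)).2.2) = st := by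
  induction rest with
  | nil => intro inter seq st _; rfl
  | cons lst rest ih =>
    intro inter seq st h
    have h' : (PySem.Set.inter inter (PySem.Set.ofList lst)).length ≤ st.2.length :=
      le_trans (pvInter_len_le _) h
    simp only [List.foldl_cons]
    rw [show (if (PySem.Set.inter inter (PySem.Set.ofList lst)).length > st.2.length
          then (seq ++ [lst], PySem.Set.inter inter (PySem.Set.ofList lst)) else st) = st
        from if_neg (Nat.not_lt.mpr h')]
    exact ih _ _ _ h'

theorem pvAInner_const_long (c0 c1 : List Int) (t : List (List Int))
    (st : List (List Int) × List Int) (h : (pvInter c0 c1).length ≤ st.2.length) :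
    pvAInner st (c0 :: c1 :: t) = st := by
  simp only [pvAInner, List.foldl_cons]
  rw [show (if (PySem.Set.inter (PySem.Set.ofList c0) (PySem.Set.ofList c1)).length > st.2.length
        then ([c0] ++ [c1], PySem.Set.inter (PySem.Set.ofList c0) (PySem.Set.ofList c1)) else st) = st
      from if_neg (Nat.not_lt.mpr h)]
  exact pvInnerFold_const t _ _ st h

theorem pvMem_pvCombos {α : Type} :
    ∀ (xs : List α) (k : Nat) (c : List α), c ∈ pvCombos k xs → c.Sublist xs ∧ c.length = k := by
  intro xs
  induction xs with
  | nil =>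
    intro k c hc
    cases k with
    | zero => simp only [pvCombos, List.mem_singleton] at hc; subst hc; exact ⟨List.Sublist.refl _, rfl⟩
    | succ k => simp [pvCombos] at hc
  | cons x xs ih =>
    intro k c hc
    cases k with
    | zero => simp only [pvCombos, List.mem_singleton] at hc; subst hc; exact ⟨List.nil_sublist _, rfl⟩
    | succ k =>
      simp only [pvCombos, List.mem_append, List.mem_map] at hc
      rcases hc with ⟨c', hc', rfl⟩ | hc
      · obtain ⟨hs, hl⟩ := ih k c' hc'
        exact ⟨List.Sublist.cons₂ x hs, by simp [hl]⟩
      · obtain ⟨hs, hl⟩ := ih (k + 1) c hc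
        exact ⟨hs.cons x, hl⟩

theorem pvPair_of_sublist {α : Type} {c0 c1 : α} {t : List α} :
    ∀ {xs : List α}, (c0 :: c1 :: t).Sublist xs → (c0, c1) ∈ pvPairs xs := by
  intro xs
  induction xs with
  | nil => intro h; exact absurd h (by simp)
  | cons x xs ih =>
    intro h
    cases h with
    | cons _ h' => exact List.mem_append_right _ (ih h')
    | cons₂ _ h' =>
      refine List.mem_append_left _ ?_
      exact List.mem_map.mpr ⟨c1, h'.subset (List.mem_cons_self ..), rfl⟩

theorem pvCombos_one {α : Type} (xs : List α) :
    pvCombos 1 xs = xs.map (fun y => [y]) := by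
  induction xs with
  | nil => rfl
  | cons x xs ih => simp [pvCombos, ih]

theorem pvCombos_two {α : Type} (xs : List α) :
    pvCombos 2 xs = (pvPairs xs).map (fun p => [p.1, p.2]) := by
  induction xs with
  | nil => rfl
  | cons x xs ih => simp [pvCombos, pvPairs, pvCombos_one, ih, List.map_map, Function.comp_def]

theorem pvCombos_two_fold (lists : List (List Int)) (st : List (List Int) × List Int) :
    (pvCombos 2 lists).foldl pvAInner st = (pvPairs lists).foldl pvStep st := by
  rw [pvCombos_two, List.foldl_map]
  rfl

theorem pvFoldl_id {α : Type} (cs : List α) (f : (List (List Int) × List Int) → α → (List (List Int) × List Int))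
    (st : List (List Int) × List Int) (h : ∀ c ∈ cs, f st c = st) :
    cs.foldl f st = st := by
  induction cs with
  | nil => rfl
  | cons c cs ih =>
    simp only [List.foldl_cons, h c (List.mem_cons_self ..)]
    exact ih (fun c hc => h c (List.mem_cons_of_mem _ hc))

theorem pvCombosFold_id (lists : List (List Int)) (k : Nat) (st : List (List Int) × List Int)
    (H : ∀ p ∈ pvPairs lists, (pvInter p.1 p.2).length ≤ st.2.length) :
    (pvCombos k lists).foldl pvAInner st = st := by
  refine pvFoldl_id _ _ _ ?_
  intro c hc
  match c with
  | [] => rfl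
  | [c0] => rfl
  | c0 :: c1 :: t =>
    exact pvAInner_const_long c0 c1 t st
      (H (c0, c1) (pvPair_of_sublist (pvMem_pvCombos lists k _ hc).1))

theorem pvTail_id (lists : List (List Int)) (rs : List Int) :
    ∀ st, (∀ p ∈ pvPairs lists, (pvInter p.1 p.2).length ≤ st.2.length) →
      rs.foldl (fun st r => (pvCombos r.toNat lists).foldl pvAInner st) st = st := by
  induction rs with
  | nil => intro st _; rfl
  | cons r rs ih =>
    intro st H
    simp only [List.foldl_cons, pvCombosFold_id lists r.toNat st H]
    exact ih st H

-- ===== VERDICT (by name: the statement is the Claim_ definition above) =====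
theorem max_intersection_spec : Claim_equal_max_intersection := by
  intro lists _
  unfold Spec_max_intersection max_intersection max_intersection_alt
  rw [pvBGo_eq]
  by_cases h2 : (2 : Int) < (lists.length : Int) + 1
  · rw [PySem.List.pyRange_one_cons h2]
    simp only [List.foldl_cons]
    rw [show ((2 : Int)).toNat = 2 from rfl, pvCombos_two_fold]
    exact pvTail_id lists _ _ (fun p hp => pvFoldl_mem_le _ _ p hp)
  · have hn : lists.length ≤ 1 := by omega
    match lists, hn with
    | [], _ => rfl
    | [a], _ => rfl
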